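-- pv_equiv track=rewrite | github.com/KareemAlaa2001/GCNUserClassifier | src/generalised/lib/stackoverflowproc/graphBuilder.py | buildLikewiseRelationships
-- ===== SOURCE A (Python) =====
-- def buildLikewiseRelationships(neighbourhoods):
--
--     for nodetype in neighbourhoods:
--         for nodeid in neighbourhoods[nodetype]:
--             nodeneighbourhood = neighbourhoods[nodetype][nodeid]
--             for neighbourid in nodeneighbourhood:
--                 neighbourtype = nodeneighbourhood[neighbourid]
--                 neighbourhoods[neighbourtype][neighbourid][nodeid] = nodetype
--
--     return neighbourhoods
-- ===== SOURCE B (Python) =====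
-- # Two-phase re-implementation: collect all edges from an immutable snapshot first,
-- # then perform the reciprocal writes in a flat second pass (A instead mutates the
-- # nested dicts while iterating them live, re-visiting mirror entries added mid-run).
-- # Like A, this mutates `neighbourhoods` in place and returns it.
-- def buildLikewiseRelationships(neighbourhoods):
--     edges = [(nodetype, nodeid, neighbourid, neighbourtype)
--              for nodetype, nodes in neighbourhoods.items()
--              for nodeid, nodeneighbourhood in nodes.items()
--              for neighbourid, neighbourtype in nodeneighbourhood.items()]
--     for nodetype, nodeid, neighbourid, neighbourtype in edges:
--         neighbourhoods[neighbourtype][neighbourid][nodeid] = nodetype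
--     return neighbourhoods
-- ===== Notes on version B (the rewrite author's own statement) =====
-- stated objective: alternative
-- what changed: B snapshots all edges into a flat list with a pure comprehension and then performs every reciprocal write in a separate second pass, instead of A's writes interleaved with live iteration of the dicts being mutated (A also re-processes mirror entries that its own earlier writes appended).
import Mathlib
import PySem

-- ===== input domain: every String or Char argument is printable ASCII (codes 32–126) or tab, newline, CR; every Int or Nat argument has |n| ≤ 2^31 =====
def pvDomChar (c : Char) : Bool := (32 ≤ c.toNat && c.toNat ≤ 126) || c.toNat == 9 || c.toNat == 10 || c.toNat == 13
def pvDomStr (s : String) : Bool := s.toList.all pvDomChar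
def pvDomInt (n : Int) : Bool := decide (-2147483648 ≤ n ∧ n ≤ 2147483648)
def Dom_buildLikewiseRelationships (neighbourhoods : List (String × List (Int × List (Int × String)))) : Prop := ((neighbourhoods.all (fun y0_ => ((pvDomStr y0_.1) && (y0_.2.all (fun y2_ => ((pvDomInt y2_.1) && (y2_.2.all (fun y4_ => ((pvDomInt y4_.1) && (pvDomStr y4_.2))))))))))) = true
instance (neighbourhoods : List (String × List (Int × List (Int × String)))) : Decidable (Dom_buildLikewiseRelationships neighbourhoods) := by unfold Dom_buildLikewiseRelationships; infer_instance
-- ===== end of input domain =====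

-- B changes the decomposition: a pure snapshot of all edges first, then a flat pass of
-- reciprocal writes, instead of A's writes interleaved with live iteration of the mutated
-- dicts. Both Pythons mutate their argument in place; the equivalence proved here is about
-- the RETURN value only.

-- ===== PORT A =====
-- shared low-level dict primitives (hand-rolled association-list ops; exact for Python
-- dicts represented as insertion-ordered assoc lists with distinct keys):
-- first-match lookup, `m[k]` (none = KeyError)
def look {α β : Type} [DecidableEq α] : List (α × β) → α → Option β
  | [], _ => none
  | (k, v) :: r, a => if k = a then some v else look r a

-- innermost `nb[x] = t`: overwrite the first x-entry in place, else append
def setNbr : List (Int × String) → Int → String → List (Int × String)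
  | [], x, t => [(x, t)]
  | (k, v) :: r, x, t => if k = x then (k, t) :: r else (k, v) :: setNbr r x t

-- `m[y][x] = t` inside one type's node map (no-op when y is missing: Python raises
-- KeyError there; such inputs are excluded by Pre_)
def wrNode : List (Int × List (Int × String)) → Int → Int → String → List (Int × List (Int × String))
  | [], _, _, _ => []
  | (k, nb) :: r, y, x, t => if k = y then (k, setNbr nb x t) :: r else (k, nb) :: wrNode r y x t

-- `neighbourhoods[s][y][x] = t` (no-op when s is missing: KeyError, excluded by Pre_)
def wrType : List (String × List (Int × List (Int × String))) → String → Int → Int → String → List (String × List (Int × List (Int × String)))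
  | [], _, _, _, _ => []
  | (k, m) :: r, s, y, x, t => if k = s then (k, wrNode m y x t) :: r else (k, m) :: wrType r s y x t

-- A iterates the live dicts; writes never change the key lists at levels 1/2 and never
-- grow the level-3 dict currently being iterated, so index loops whose fuel is the length
-- read at loop entry are an exact rendering of Python's live `for k in dct` iteration.
def innerA : Nat → List (String × List (Int × List (Int × String))) → Nat → Nat → Nat → List (String × List (Int × List (Int × String)))
  | 0, σ, _, _, _ => σ
  | f + 1, σ, i, j, k =>
    match σ[i]? with
    | none => σ
    | some (t, m) =>
      match m[j]? with
      | none => σ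
      | some (x, nb) =>
        match nb[k]? with
        | none => σ
        | some (y, _) =>
          match look nb y with                       -- neighbourtype = nodeneighbourhood[neighbourid]
          | none => σ
          | some s => innerA f (wrType σ s y x t) i j (k + 1)

def middleA : Nat → List (String × List (Int × List (Int × String))) → Nat → Nat → List (String × List (Int × List (Int × String)))
  | 0, σ, _, _ => σ
  | f + 1, σ, i, j =>
    match σ[i]? with
    | none => σ
    | some (_, m) =>
      match m[j]? with
      | none => σ
      | some (_, nb) => middleA f (innerA nb.length σ i j 0) i (j + 1)

def outerA : Nat → List (String × List (Int × List (Int × String))) → Nat → List (String × List (Int × List (Int × String)))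
  | 0, σ, _ => σ
  | f + 1, σ, i =>
    match σ[i]? with
    | none => σ
    | some (_, m) => outerA f (middleA m.length σ i 0) (i + 1)

def buildLikewiseRelationships (neighbourhoods : List (String × List (Int × List (Int × String)))) : List (String × List (Int × List (Int × String))) :=
  outerA neighbourhoods.length neighbourhoods 0

-- ===== PORT B =====
-- phase 1: pure snapshot of all edges (the comprehension in Source B)
def gather (d : List (String × List (Int × List (Int × String)))) : List (String × Int × Int × String) :=
  d.flatMap (fun p => p.2.flatMap (fun q => q.2.map (fun e => (p.1, q.1, e.1, e.2))))

-- phase 2: flat pass of reciprocal writes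
def applyW (σ : List (String × List (Int × List (Int × String)))) (es : List (String × Int × Int × String)) : List (String × List (Int × List (Int × String))) :=
  es.foldl (fun σ e => wrType σ e.2.2.2 e.2.2.1 e.2.1 e.1) σ

def buildLikewiseRelationships_alt (neighbourhoods : List (String × List (Int × List (Int × String)))) : List (String × List (Int × List (Int × String))) :=
  applyW neighbourhoods (gather neighbourhoods)

-- ===== PRECONDITION & SPEC =====
-- id z is "active": it owns a nonempty neighbourhood or is referenced by some edge
def Active (d : List (String × List (Int × List (Int × String)))) (z : Int) : Prop :=
  (∃ p ∈ d, ∃ q ∈ p.2, q.1 = z ∧ q.2 ≠ []) ∨ (∃ p ∈ d, ∃ q ∈ p.2, ∃ e ∈ q.2, e.1 = z)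

-- Pre_ excludes: assoc lists with duplicate keys at some level (no Python dict has them);
-- edges whose target (type, id) is missing (Python A raises KeyError there); and inputs
-- where an active id sits under more than one node type — there A's answer depends on
-- entries its own writes appended to dicts it iterates later, an accident of mutation
-- order, and either answer is as defensible as the other.
def Pre_buildLikewiseRelationships (neighbourhoods : List (String × List (Int × List (Int × String)))) : Prop :=
  (neighbourhoods.map Prod.fst).Nodup ∧
  (∀ p ∈ neighbourhoods, (p.2.map Prod.fst).Nodup) ∧
  (∀ p ∈ neighbourhoods, ∀ q ∈ p.2, (q.2.map Prod.fst).Nodup) ∧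
  (∀ p ∈ neighbourhoods, ∀ q ∈ p.2, ∀ e ∈ q.2,
     ∃ p' ∈ neighbourhoods, p'.1 = e.2 ∧ ∃ q' ∈ p'.2, q'.1 = e.1) ∧
  (∀ p ∈ neighbourhoods, ∀ p' ∈ neighbourhoods, ∀ q ∈ p.2, ∀ q' ∈ p'.2,
     q.1 = q'.1 → Active neighbourhoods q.1 → p.1 = p'.1)

instance (neighbourhoods : List (String × List (Int × List (Int × String)))) : Decidable (Pre_buildLikewiseRelationships neighbourhoods) := by
  unfold Pre_buildLikewiseRelationships Active; infer_instance

def pvWitness_buildLikewiseRelationships : (List (String × List (Int × List (Int × String)))) :=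
  [("a", [(1, [(2, "b")])]), ("b", [(2, [(1, "a")])])]

def Spec_buildLikewiseRelationships (neighbourhoods : List (String × List (Int × List (Int × String)))) (out : List (String × List (Int × List (Int × String)))) : Prop := out = buildLikewiseRelationships_alt neighbourhoods
instance (neighbourhoods : List (String × List (Int × List (Int × String)))) (out : List (String × List (Int × List (Int × String)))) : Decidable (Spec_buildLikewiseRelationships neighbourhoods out) := by unfold Spec_buildLikewiseRelationships; infer_instance

-- ===== CLAIM (what is proved, stated in full; the proofs are below) =====
def Claim_equal_buildLikewiseRelationships : Prop := ∀ (neighbourhoods : List (String × List (Int × List (Int × String)))), Dom_buildLikewiseRelationships neighbourhoods → Pre_buildLikewiseRelationships neighbourhoods → Spec_buildLikewiseRelationships neighbourhoods (buildLikewiseRelationships neighbourhoods)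

-- ===== LEMMAS AND PROOFS =====

abbrev St := List (String × List (Int × List (Int × String)))
abbrev NMap := List (Int × List (Int × String))
abbrev Nbr := List (Int × String)

-- `d[t][x]` as an Option (used by the lemmas below)
def g2 (σ : St) (t : String) (x : Int) : Option Nbr :=
  match look σ t with
  | none => none
  | some m => look m x

-- id z appears at level 2 only under type t
def OnlyUnder (d : St) (z : Int) (t : String) : Prop :=
  ∀ p ∈ d, ∀ q ∈ p.2, q.1 = z → p.1 = t

-- id z has type t with a dict present, is active, and sits under no other type
def GoodId (d : St) (z : Int) (t : String) : Prop :=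
  Active d z ∧ (g2 d t z).isSome = true ∧ OnlyUnder d z t

-- the simulation invariant relating the evolving state σ to the original input d
def INV (d σ : St) : Prop :=
  σ.map Prod.fst = d.map Prod.fst ∧
  (∀ t m m', look d t = some m → look σ t = some m' → m'.map Prod.fst = m.map Prod.fst) ∧
  (∀ t x nbd nbs, g2 d t x = some nbd → g2 σ t x = some nbs →
     ∃ ex, nbs = nbd ++ ex ∧ (nbs.map Prod.fst).Nodup ∧
       ∀ e ∈ ex, GoodId d x t ∧ GoodId d e.1 e.2 ∧
         ∃ nb, g2 σ e.2 e.1 = some nb ∧ x ∈ nb.map Prod.fst)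


-- ---- basic facts about `look` ----

theorem look_eq_none {α β : Type} [DecidableEq α] (l : List (α × β)) (a : α) :
    look l a = none ↔ a ∉ l.map Prod.fst := by
  induction l with
  | nil => simp [look]
  | cons p r ih =>
    obtain ⟨k, v⟩ := p
    by_cases h : k = a
    · subst h; simp [look]
    · simp only [look, if_neg h, ih, List.map_cons, List.mem_cons]
      constructor
      · rintro hn (rfl | h2)
        · exact h rfl
        · exact hn h2
      · exact fun hn h2 => hn (Or.inr h2)

theorem look_mem {α β : Type} [DecidableEq α] {l : List (α × β)} {a : α} {b : β}
    (h : look l a = some b) : (a, b) ∈ l := by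
  induction l with
  | nil => simp [look] at h
  | cons p r ih =>
    obtain ⟨k, v⟩ := p
    by_cases hk : k = a
    · simp [look, hk] at h; simp [hk, h]
    · simp [look, hk] at h; simp [ih h]

theorem look_isSome_of_mem {α β : Type} [DecidableEq α] {l : List (α × β)} {a : α}
    (h : a ∈ l.map Prod.fst) : ∃ b, look l a = some b := by
  cases hl : look l a with
  | none => exact absurd h ((look_eq_none l a).mp hl)
  | some b => exact ⟨b, rfl⟩

theorem look_append_left {α β : Type} [DecidableEq α] {l : List (α × β)} (r : List (α × β)) {a : α}
    (h : a ∈ l.map Prod.fst) : look (l ++ r) a = look l a := by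
  induction l with
  | nil => simp at h
  | cons p t ih =>
    obtain ⟨k, v⟩ := p
    by_cases hk : k = a
    · simp [look, hk]
    · rw [List.map_cons] at h
      rcases List.mem_cons.mp h with h1 | h1
      · exact absurd h1.symm hk
      · simp [look, hk, ih h1]

theorem look_append_right {α β : Type} [DecidableEq α] {l : List (α × β)} (r : List (α × β)) {a : α}
    (h : a ∉ l.map Prod.fst) : look (l ++ r) a = look r a := by
  induction l with
  | nil => simp
  | cons p t ih =>
    obtain ⟨k, v⟩ := p
    rw [List.map_cons] at h
    have hk : ¬ k = a := fun he => h (List.mem_cons.mpr (Or.inl he.symm))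
    have h2 : a ∉ t.map Prod.fst := fun hm => h (List.mem_cons.mpr (Or.inr hm))
    simp [look, hk, ih h2]

theorem look_of_getElem? {α β : Type} [DecidableEq α] {l : List (α × β)} {k : ℕ} {a : α} {b : β}
    (hnd : (l.map Prod.fst).Nodup) (h : l[k]? = some (a, b)) : look l a = some b := by
  induction l generalizing k with
  | nil => simp at h
  | cons p r ih =>
    obtain ⟨k0, v⟩ := p
    rw [List.map_cons] at hnd
    have hnd' := List.nodup_cons.mp hnd
    cases k with
    | zero =>
      simp at h
      simp [look, h.1, h.2]
    | succ k =>
      rw [List.getElem?_cons_succ] at h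
      have hgm : (r.map Prod.fst)[k]? = some a := by
        rw [List.getElem?_map, h]; rfl
      have hmem : a ∈ r.map Prod.fst := List.mem_of_getElem? hgm
      have hne : ¬ k0 = a := fun he => hnd'.1 (he ▸ hmem)
      simp [look, hne, ih hnd'.2 h]

theorem look_isSome_congr {α β γ : Type} [DecidableEq α] {l : List (α × β)} {l' : List (α × γ)}
    (h : l.map Prod.fst = l'.map Prod.fst) (a : α) : (look l a).isSome = (look l' a).isSome := by
  induction l generalizing l' with
  | nil => cases l' <;> simp_all [look]
  | cons p r ih =>
    obtain ⟨k, v⟩ := p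
    cases l' with
    | nil => simp at h
    | cons p' r' =>
      obtain ⟨k', v'⟩ := p'
      simp at h
      obtain ⟨hk1, hk2⟩ := h
      subst hk1
      by_cases hk : k = a <;> simp [look, hk, ih hk2]

-- ---- setNbr ----

theorem setNbr_self {nb : Nbr} {x : Int} {t : String}
    (h : look nb x = some t) : setNbr nb x t = nb := by
  induction nb with
  | nil => simp [look] at h
  | cons p r ih =>
    obtain ⟨k, v⟩ := p
    by_cases hk : k = x <;> simp_all [look, setNbr]

theorem setNbr_append {nb : Nbr} {x : Int} (t : String)
    (h : look nb x = none) : setNbr nb x t = nb ++ [(x, t)] := by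
  induction nb with
  | nil => simp [setNbr]
  | cons p r ih =>
    obtain ⟨k, v⟩ := p
    by_cases hk : k = x <;> simp_all [look, setNbr]

-- ---- wrNode ----

theorem map_fst_wrNode (m : NMap) (y x : Int) (t : String) :
    (wrNode m y x t).map Prod.fst = m.map Prod.fst := by
  induction m with
  | nil => rfl
  | cons p r ih =>
    obtain ⟨k, nb⟩ := p
    by_cases hk : k = y <;> simp [wrNode, hk, ih]

theorem wrNode_self {m : NMap} {y : Int} {nb : Nbr} {x : Int} {t : String}
    (hl : look m y = some nb) (hs : setNbr nb x t = nb) : wrNode m y x t = m := by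
  induction m with
  | nil => simp [look] at hl
  | cons p r ih =>
    obtain ⟨k, nb0⟩ := p
    by_cases hk : k = y
    · simp [look, hk] at hl
      simp [wrNode, hk, hl, hs]
    · simp [look, hk] at hl
      simp [wrNode, hk, ih hl]

theorem look_wrNode (m : NMap) (y x : Int) (t : String) (y' : Int) :
    look (wrNode m y x t) y' =
      if y' = y then (look m y).map (fun nb => setNbr nb x t) else look m y' := by
  induction m with
  | nil => by_cases h : y' = y <;> simp [wrNode, look, h]
  | cons p r ih =>
    obtain ⟨k, nb⟩ := p
    by_cases hk : k = y
    · subst hk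
      by_cases h : y' = k
      · subst h; simp [wrNode, look]
      · have h' : ¬ k = y' := fun he => h he.symm
        simp [wrNode, look, h, h']
    · by_cases h : y' = y
      · subst h
        simp [wrNode, look, hk, ih]
      · by_cases h2 : k = y'
        · simp [wrNode, look, h2, h]
        · simp [wrNode, look, hk, h2, h, ih]

-- ---- wrType ----

theorem map_fst_wrType (σ : St) (s : String) (y x : Int) (t : String) :
    (wrType σ s y x t).map Prod.fst = σ.map Prod.fst := by
  induction σ with
  | nil => rfl
  | cons p r ih =>
    obtain ⟨k, m⟩ := p
    by_cases hk : k = s <;> simp [wrType, hk, ih]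

theorem wrType_self {σ : St} {s : String} {m : NMap} {y x : Int} {t : String}
    (hl : look σ s = some m) (hs : wrNode m y x t = m) : wrType σ s y x t = σ := by
  induction σ with
  | nil => simp [look] at hl
  | cons p r ih =>
    obtain ⟨k, m0⟩ := p
    by_cases hk : k = s
    · simp [look, hk] at hl
      simp [wrType, hk, hl, hs]
    · simp [look, hk] at hl
      simp [wrType, hk, ih hl]

theorem look_wrType (σ : St) (s : String) (y x : Int) (t : String) (s' : String) :
    look (wrType σ s y x t) s' =
      if s' = s then (look σ s).map (fun m => wrNode m y x t) else look σ s' := by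
  induction σ with
  | nil => by_cases h : s' = s <;> simp [wrType, look, h]
  | cons p r ih =>
    obtain ⟨k, m⟩ := p
    by_cases hk : k = s
    · subst hk
      by_cases h : s' = k
      · subst h; simp [wrType, look]
      · have h' : ¬ k = s' := fun he => h he.symm
        simp [wrType, look, h, h']
    · by_cases h : s' = s
      · subst h
        simp [wrType, look, hk, ih]
      · by_cases h2 : k = s'
        · simp [wrType, look, h2, h]
        · simp [wrType, look, hk, h2, h, ih]

theorem g2_wrType (σ : St) (s : String) (y x : Int) (t : String) (a : String) (b : Int) :
    g2 (wrType σ s y x t) a b =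
      if a = s ∧ b = y then (g2 σ s y).map (fun nb => setNbr nb x t) else g2 σ a b := by
  unfold g2
  rw [look_wrType]
  by_cases ha : a = s
  · subst ha
    rw [if_pos rfl]
    cases hm : look σ a with
    | none => by_cases hb : b = y <;> simp [hb]
    | some m =>
      simp only [Option.map_some]
      rw [look_wrNode]
      by_cases hb : b = y <;> simp [hb]
  · simp [ha]

-- ---- derived facts about g2, Pre_ and INV ----

theorem g2_mem {d : St} {t : String} {x : Int} {nb : Nbr}
    (h : g2 d t x = some nb) : ∃ m, (t, m) ∈ d ∧ (x, nb) ∈ m := by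
  unfold g2 at h
  cases hm : look d t with
  | none => rw [hm] at h; cases h
  | some m => rw [hm] at h; exact ⟨m, look_mem hm, look_mem h⟩

theorem look_of_mem_nodup {α β : Type} [DecidableEq α] {l : List (α × β)} {a : α} {b : β}
    (hnd : (l.map Prod.fst).Nodup) (h : (a, b) ∈ l) : look l a = some b := by
  induction l with
  | nil => cases h
  | cons p r ih =>
    obtain ⟨k, v⟩ := p
    rw [List.map_cons] at hnd
    have hnd' := List.nodup_cons.mp hnd
    rcases List.mem_cons.mp h with h1 | h1
    · cases h1
      simp [look]
    · have hk : ¬ k = a := by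
        rintro rfl
        exact hnd'.1 (List.mem_map.mpr ⟨(k, b), h1, rfl⟩)
      simp [look, hk, ih hnd'.2 h1]

-- the resolvability clause of Pre_, read back through g2
theorem pre_res {d : St} (hpre : Pre_buildLikewiseRelationships d) :
    ∀ p ∈ d, ∀ q ∈ p.2, ∀ e ∈ q.2, (g2 d e.2 e.1).isSome = true := by
  intro p hp q hq e he
  obtain ⟨p', hp', hfst, q', hq', hqfst⟩ := hpre.2.2.2.1 p hp q hq e he
  obtain ⟨t', m'⟩ := p'
  obtain ⟨y', nb'⟩ := q'
  cases hfst
  cases hqfst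
  unfold g2
  rw [look_of_mem_nodup hpre.1 hp']
  simp only []
  rw [look_of_mem_nodup (hpre.2.1 _ hp') hq']
  rfl

theorem getElem?_fst_congr {α β γ : Type} {l : List (α × β)} {l' : List (α × γ)}
    (h : l.map Prod.fst = l'.map Prod.fst) (i : ℕ) :
    (l[i]?).map Prod.fst = (l'[i]?).map Prod.fst := by
  have := congrArg (fun z => z[i]?) h
  simpa [List.getElem?_map] using this

theorem INV_g2_some {d σ : St} (hinv : INV d σ) (a : String) (b : Int) :
    (g2 σ a b).isSome = (g2 d a b).isSome := by
  obtain ⟨hk1, hk2, _⟩ := hinv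
  unfold g2
  have hs := look_isSome_congr hk1 a
  cases hd : look d a with
  | none =>
    rw [hd] at hs
    cases hσ : look σ a with
    | none => rfl
    | some m => rw [hσ] at hs; simp at hs
  | some m =>
    rw [hd] at hs
    cases hσ : look σ a with
    | none => rw [hσ] at hs; simp at hs
    | some m' => exact look_isSome_congr (hk2 a m m' hd hσ) b

theorem GoodId_of_owner {d : St} {t : String} {x : Int} {nbd : Nbr}
    (hpre : Pre_buildLikewiseRelationships d) (ht : g2 d t x = some nbd) (hne : nbd ≠ []) :
    GoodId d x t := by
  obtain ⟨_, _, _, _, huniq⟩ := hpre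
  obtain ⟨m, hm, hxm⟩ := g2_mem ht
  have hact : Active d x := Or.inl ⟨(t, m), hm, (x, nbd), hxm, rfl, hne⟩
  refine ⟨hact, by rw [ht]; rfl, ?_⟩
  intro p hp q hq hq1
  exact huniq p hp (t, m) hm q hq (x, nbd) hxm (by rw [hq1]) (hq1 ▸ hact)

theorem GoodId_of_edge {d : St} {t : String} {m : NMap} {x : Int} {nb : Nbr} {y : Int} {s : String}
    (hpre : Pre_buildLikewiseRelationships d) (hm : (t, m) ∈ d) (hx : (x, nb) ∈ m)
    (hy : (y, s) ∈ nb) : GoodId d y s := by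
  have huniq := hpre.2.2.2.2
  have hsome : (g2 d s y).isSome = true := pre_res hpre (t, m) hm (x, nb) hx (y, s) hy
  have hact : Active d y := Or.inr ⟨(t, m), hm, (x, nb), hx, (y, s), hy, rfl⟩
  refine ⟨hact, hsome, ?_⟩
  obtain ⟨nbs, hnbs⟩ := Option.isSome_iff_exists.mp hsome
  obtain ⟨ms, hms, hyms⟩ := g2_mem hnbs
  intro p hp q hq hq1
  exact huniq p hp (s, ms) hms q hq (y, nbs) hyms (by rw [hq1]) (hq1 ▸ hact)

theorem value_canon {d σ : St} {t : String} {x : Int} {v : String} {yy : Int} {nb : Nbr} {u : String}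
    (hpre : Pre_buildLikewiseRelationships d) (hinv : INV d σ)
    (hx : (g2 d t x).isSome = true) (hax : Active d x)
    (hnb : g2 σ v yy = some nb) (hu : look nb x = some u) : u = t := by
  obtain ⟨nbt, hnbt⟩ := Option.isSome_iff_exists.mp hx
  obtain ⟨mt, hmt, hxmt⟩ := g2_mem hnbt
  have hdsome : (g2 d v yy).isSome = true := by
    rw [← INV_g2_some hinv, hnb]; rfl
  obtain ⟨nbd, hnbd⟩ := Option.isSome_iff_exists.mp hdsome
  obtain ⟨ex, heq, hnodup, hcond⟩ := hinv.2.2 v yy nbd nb hnbd hnb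
  by_cases hxm : x ∈ nbd.map Prod.fst
  · rw [heq, look_append_left _ hxm] at hu
    have hmem := look_mem hu
    obtain ⟨mv, hmv, hyymv⟩ := g2_mem hnbd
    have hus : (g2 d u x).isSome = true :=
      pre_res hpre (v, mv) hmv (yy, nbd) hyymv (x, u) hmem
    obtain ⟨nbu, hnbu⟩ := Option.isSome_iff_exists.mp hus
    obtain ⟨mu, hmu, hxmu⟩ := g2_mem hnbu
    exact hpre.2.2.2.2 (u, mu) hmu (t, mt) hmt (x, nbu) hxmu (x, nbt) hxmt rfl hax
  · rw [heq, look_append_right _ hxm] at hu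
    have hmem := look_mem hu
    have hgood := (hcond (x, u) hmem).2.1
    exact (hgood.2.2 (t, mt) hmt (x, nbt) hxmt rfl).symm

theorem noop_write {d σ : St} {t : String} {x : Int} {s : String} {yy : Int} {nb : Nbr}
    (hpre : Pre_buildLikewiseRelationships d) (hinv : INV d σ)
    (hx : (g2 d t x).isSome = true) (hax : Active d x)
    (hnb : g2 σ s yy = some nb) (hmem : x ∈ nb.map Prod.fst) :
    wrType σ s yy x t = σ := by
  obtain ⟨u, hu⟩ := look_isSome_of_mem hmem
  have hut : u = t := value_canon hpre hinv hx hax hnb hu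
  subst hut
  unfold g2 at hnb
  cases hm : look σ s with
  | none => rw [hm] at hnb; cases hnb
  | some m =>
    rw [hm] at hnb
    exact wrType_self hm (wrNode_self hnb (setNbr_self hu))

theorem map_fst_setNbr_mem {nb : Nbr} {x : Int} {u t : String} (h : look nb x = some u) :
    (setNbr nb x t).map Prod.fst = nb.map Prod.fst := by
  induction nb with
  | nil => simp [look] at h
  | cons p r ih =>
    obtain ⟨k, v⟩ := p
    by_cases hk : k = x <;> simp_all [look, setNbr]

theorem mirror_lift {σ : St} {s : String} {yy x : Int} {t : String} {nbY : Nbr}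
    (hnbY : g2 σ s yy = some nbY) (c : String) (z : Int) {nb : Nbr} {x0 : Int}
    (h : g2 σ c z = some nb) (hx0 : x0 ∈ nb.map Prod.fst) :
    ∃ nb', g2 (wrType σ s yy x t) c z = some nb' ∧ x0 ∈ nb'.map Prod.fst := by
  rw [g2_wrType]
  by_cases hc : c = s ∧ z = yy
  · obtain ⟨rfl, rfl⟩ := hc
    rw [if_pos ⟨rfl, rfl⟩, hnbY]
    have hnb' : nb = nbY := by rw [h] at hnbY; exact Option.some.inj hnbY
    subst hnb'
    cases hlx : look nb x with
    | some u =>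
      refine ⟨setNbr nb x t, by rw [Option.map_some], ?_⟩
      rw [map_fst_setNbr_mem hlx]; exact hx0
    | none =>
      refine ⟨nb ++ [(x, t)], ?_, ?_⟩
      · rw [Option.map_some, setNbr_append t hlx]
      · rw [List.map_append]; exact List.mem_append_left _ hx0
  · rw [if_neg hc]
    exact ⟨nb, h, hx0⟩

theorem g2_own {σ : St} {t : String} {x yy : Int} {v : String} {nbs : Nbr}
    (hσ : g2 σ t x = some nbs) (hv : look nbs yy = some v) :
    g2 (wrType σ v yy x t) t x = some nbs := by
  rw [g2_wrType]
  by_cases hc : t = v ∧ x = yy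
  · obtain ⟨h1, h2⟩ := hc
    subst h1; subst h2
    rw [if_pos ⟨rfl, rfl⟩, hσ, Option.map_some, setNbr_self hv]
  · rw [if_neg hc]; exact hσ

theorem write_orig {d σ : St} {t : String} {x : Int} {nbd : Nbr} {yy : Int} {s : String}
    (hpre : Pre_buildLikewiseRelationships d) (hinv : INV d σ)
    (ht : g2 d t x = some nbd) (hys : (yy, s) ∈ nbd) :
    INV d (wrType σ s yy x t) := by
  have hGy : GoodId d yy s := by
    obtain ⟨m, hm, hxm⟩ := g2_mem ht
    exact GoodId_of_edge hpre hm hxm hys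
  have hGx : GoodId d x t := GoodId_of_owner hpre ht (by rintro rfl; cases hys)
  obtain ⟨nbY, hnbY⟩ := Option.isSome_iff_exists.mp
    ((INV_g2_some hinv s yy).trans hGy.2.1)
  cases hlx : look nbY x with
  | some u =>
    rw [noop_write hpre hinv hGx.2.1 hGx.1 hnbY
      (List.mem_map.mpr ⟨(x, u), look_mem hlx, rfl⟩)]
    exact hinv
  | none =>
    obtain ⟨hk1, hk2, h3⟩ := hinv
    have hinv' : INV d σ := ⟨hk1, hk2, h3⟩
    have hgσ := hnbY
    unfold g2 at hgσ
    cases hmσ : look σ s with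
    | none => rw [hmσ] at hgσ; cases hgσ
    | some mσs =>
    rw [hmσ] at hgσ
    refine ⟨?_, ?_, ?_⟩
    · rw [map_fst_wrType]; exact hk1
    · intro t0 m m' hd0 hs0
      rw [look_wrType] at hs0
      by_cases h : t0 = s
      · subst h
        rw [hmσ] at hs0
        rw [if_pos rfl, Option.map_some] at hs0
        have hm' := Option.some.inj hs0
        rw [← hm', map_fst_wrNode]
        exact hk2 t0 m mσs hd0 hmσ
      · rw [if_neg h] at hs0
        exact hk2 t0 m m' hd0 hs0
    · intro a b nbd0 nbs0 hd0 hs0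
      rw [g2_wrType] at hs0
      by_cases hab : a = s ∧ b = yy
      · obtain ⟨rfl, rfl⟩ := hab
        rw [if_pos ⟨rfl, rfl⟩, hnbY, Option.map_some, setNbr_append t hlx] at hs0
        have hnbs0 : nbs0 = nbY ++ [(x, t)] := (Option.some.inj hs0).symm
        obtain ⟨nbYd, hnbYd⟩ := Option.isSome_iff_exists.mp hGy.2.1
        have hdd : nbd0 = nbYd := by
          rw [hd0] at hnbYd; exact Option.some.inj hnbYd
        subst hdd
        obtain ⟨exY, heqY, hndY, hcondY⟩ := h3 a b nbd0 nbY hd0 hnbY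
        refine ⟨exY ++ [(x, t)], by rw [hnbs0, heqY, List.append_assoc], ?_, ?_⟩
        · rw [hnbs0]
          have hxn : x ∉ nbY.map Prod.fst := (look_eq_none _ _).mp hlx
          rw [List.map_append]
          simp [List.nodup_append, hndY]
          intro a1 v1 hm he
          exact hxn (he ▸ List.mem_map.mpr ⟨(a1, v1), hm, rfl⟩)
        · intro e he
          rcases List.mem_append.mp he with he | he
          · obtain ⟨hg1, hg2, nbm, hnbm, hxm⟩ := hcondY e he
            obtain ⟨nb', hnb', hmem'⟩ := mirror_lift hnbY e.2 e.1 hnbm hxm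
            exact ⟨hg1, hg2, nb', hnb', hmem'⟩
          · have he' : e = (x, t) := by simpa using he
            subst he'
            have hne : ¬ (t = a ∧ x = b) := by
              rintro ⟨rfl, rfl⟩
              obtain ⟨ex2, heq2, _, _⟩ := h3 t x nbd nbY ht hnbY
              have hxk : x ∈ nbY.map Prod.fst := by
                rw [heq2, List.map_append]
                exact List.mem_append_left _ (List.mem_map.mpr ⟨(x, t), hys, rfl⟩)
              exact absurd hxk ((look_eq_none nbY x).mp hlx)
            obtain ⟨nbtx, hnbtx⟩ := Option.isSome_iff_exists.mp
              ((INV_g2_some hinv' t x).trans hGx.2.1)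
            obtain ⟨ex3, heq3, _, _⟩ := h3 t x nbd nbtx ht hnbtx
            refine ⟨hGy, hGx, nbtx, ?_, ?_⟩
            · rw [g2_wrType, if_neg hne]
              exact hnbtx
            · rw [heq3, List.map_append]
              exact List.mem_append_left _ (List.mem_map.mpr ⟨(b, a), hys, rfl⟩)
      · rw [if_neg hab] at hs0
        obtain ⟨ex0, heq0, hnd0, hcond0⟩ := h3 a b nbd0 nbs0 hd0 hs0
        refine ⟨ex0, heq0, hnd0, ?_⟩
        intro e he
        obtain ⟨hg1, hg2, nbm, hnbm, hxm⟩ := hcond0 e he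
        obtain ⟨nb', hnb', hmem'⟩ := mirror_lift hnbY e.2 e.1 hnbm hxm
        exact ⟨hg1, hg2, nb', hnb', hmem'⟩

theorem pos_some {α β γ : Type} {l : List (α × β)} {l' : List (α × γ)}
    (h : l.map Prod.fst = l'.map Prod.fst) {i : ℕ} {a : α} {b : γ}
    (hi : l'[i]? = some (a, b)) : ∃ c, l[i]? = some (a, c) := by
  have hc := getElem?_fst_congr h i
  rw [hi] at hc
  cases hl : l[i]? with
  | none => rw [hl] at hc; cases hc
  | some p =>
    obtain ⟨a', c⟩ := p
    rw [hl] at hc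
    have ha : a' = a := by simpa using hc
    subst ha
    exact ⟨c, rfl⟩

theorem inner_sim (d : St) (hpre : Pre_buildLikewiseRelationships d) :
    ∀ (f k : ℕ) (σ : St) (i j : ℕ) (t : String) (md : NMap) (x : Int) (nbd nbs : Nbr),
      INV d σ →
      d[i]? = some (t, md) → md[j]? = some (x, nbd) →
      g2 d t x = some nbd →
      g2 σ t x = some nbs → f + k = nbs.length →
      innerA f σ i j k = applyW σ ((nbd.drop k).map (fun e => (t, x, e.1, e.2))) ∧
        INV d (innerA f σ i j k) := by
  intro f
  induction f with
  | zero =>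
    intro k σ i j t md x nbd nbs hinv hdi hmj hgd hgs hfk
    obtain ⟨ex, heq, _, _⟩ := hinv.2.2 t x nbd nbs hgd hgs
    rw [heq, List.length_append] at hfk
    have hdrop : nbd.drop k = [] := List.drop_eq_nil_of_le (by omega)
    rw [hdrop]
    exact ⟨rfl, hinv⟩
  | succ f ih =>
    intro k σ i j t md x nbd nbs hinv hdi hmj hgd hgs hfk
    obtain ⟨mσ, hσi⟩ := pos_some hinv.1 hdi
    have hlookd : look d t = some md := look_of_getElem? hpre.1 hdi
    have hnds : (σ.map Prod.fst).Nodup := hinv.1 ▸ hpre.1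
    have hlookσ : look σ t = some mσ := look_of_getElem? hnds hσi
    have hkeys2 : mσ.map Prod.fst = md.map Prod.fst := hinv.2.1 t md mσ hlookd hlookσ
    obtain ⟨nbσj, hmσj⟩ := pos_some hkeys2 hmj
    have hndmd : (md.map Prod.fst).Nodup := hpre.2.1 (t, md) (List.mem_of_getElem? hdi)
    have hndmσ : (mσ.map Prod.fst).Nodup := hkeys2 ▸ hndmd
    have hlookmσ : look mσ x = some nbσj := look_of_getElem? hndmσ hmσj
    have hgs' : g2 σ t x = some nbσj := by unfold g2; rw [hlookσ]; exact hlookmσ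
    have hnbseq : nbσj = nbs := by rw [hgs] at hgs'; exact (Option.some.inj hgs').symm
    rw [hnbseq] at hmσj hlookmσ
    cases hk : nbs[k]? with
    | none =>
      have : nbs.length ≤ k := List.getElem?_eq_none_iff.mp hk
      omega
    | some e =>
      obtain ⟨yy, v⟩ := e
      obtain ⟨ex, heq, hnodup, hcond⟩ := hinv.2.2 t x nbd nbs hgd hgs
      have hlook_nbs : look nbs yy = some v := look_of_getElem? hnodup hk
      have hstep : innerA (f + 1) σ i j k = innerA f (wrType σ v yy x t) i j (k + 1) := by
        simp [innerA, hσi, hmσj, hk, hlook_nbs]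
      by_cases hkd : k < nbd.length
      · have hnbd_k : nbd[k]? = some (yy, v) := by
          rw [heq, List.getElem?_append_left hkd] at hk
          exact hk
        have hmem : (yy, v) ∈ nbd := List.mem_of_getElem? hnbd_k
        have hinv2 := write_orig hpre hinv hgd hmem
        have hgs2 : g2 (wrType σ v yy x t) t x = some nbs := g2_own hgs hlook_nbs
        obtain ⟨ihEq, ihInv⟩ := ih (k + 1) (wrType σ v yy x t) i j t md x nbd nbs hinv2 hdi hmj hgd hgs2 (by omega)
        refine ⟨?_, by rw [hstep]; exact ihInv⟩
        rw [hstep, ihEq]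
        have hget : nbd[k] = (yy, v) := by
          rw [List.getElem?_eq_getElem hkd] at hnbd_k
          exact Option.some.inj hnbd_k
        have hdrop : nbd.drop k = (yy, v) :: nbd.drop (k + 1) := by
          rw [List.drop_eq_getElem_cons hkd, hget]
        rw [hdrop, List.map_cons]
        rfl
      · have hkex : (yy, v) ∈ ex := by
          rw [heq, List.getElem?_append_right (by omega)] at hk
          exact List.mem_of_getElem? hk
        obtain ⟨hgx, hgyv, nbm, hnbm, hxm⟩ := hcond (yy, v) hkex
        have hnoop : wrType σ v yy x t = σ := noop_write hpre hinv hgx.2.1 hgx.1 hnbm hxm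
        obtain ⟨ihEq, ihInv⟩ := ih (k + 1) σ i j t md x nbd nbs hinv hdi hmj hgd hgs (by omega)
        refine ⟨?_, by rw [hstep, hnoop]; exact ihInv⟩
        rw [hstep, hnoop, ihEq]
        have h1 : nbd.drop k = [] := List.drop_eq_nil_of_le (by omega)
        have h2 : nbd.drop (k + 1) = [] := List.drop_eq_nil_of_le (by omega)
        rw [h1, h2]


theorem applyW_append (σ : St) (l1 l2 : List (String × Int × Int × String)) :
    applyW σ (l1 ++ l2) = applyW (applyW σ l1) l2 := by
  simp [applyW]

theorem middle_sim (d : St) (hpre : Pre_buildLikewiseRelationships d) :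
    ∀ (f j : ℕ) (σ : St) (i : ℕ) (t : String) (md : NMap),
      INV d σ → d[i]? = some (t, md) → f + j = md.length →
      middleA f σ i j = applyW σ ((md.drop j).flatMap (fun q => q.2.map (fun e => (t, q.1, e.1, e.2)))) ∧
        INV d (middleA f σ i j) := by
  intro f
  induction f with
  | zero =>
    intro j σ i t md hinv hdi hfj
    have hd : md.drop j = [] := List.drop_eq_nil_of_le (by omega)
    rw [hd]
    exact ⟨rfl, hinv⟩
  | succ f ih =>
    intro j σ i t md hinv hdi hfj
    obtain ⟨mσ, hσi⟩ := pos_some hinv.1 hdi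
    have hlookd : look d t = some md := look_of_getElem? hpre.1 hdi
    have hnds : (σ.map Prod.fst).Nodup := hinv.1 ▸ hpre.1
    have hlookσ : look σ t = some mσ := look_of_getElem? hnds hσi
    have hkeys2 : mσ.map Prod.fst = md.map Prod.fst := hinv.2.1 t md mσ hlookd hlookσ
    have hjlt : j < md.length := by omega
    obtain ⟨x, nbd, hmdj⟩ : ∃ x nbd, md[j]? = some (x, nbd) := by
      cases h : md[j]? with
      | none => have := List.getElem?_eq_none_iff.mp h; omega
      | some q => obtain ⟨a, b⟩ := q; exact ⟨a, b, rfl⟩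
    obtain ⟨nbs, hmσj⟩ := pos_some hkeys2 hmdj
    have hndmd : (md.map Prod.fst).Nodup := hpre.2.1 (t, md) (List.mem_of_getElem? hdi)
    have hndmσ : (mσ.map Prod.fst).Nodup := hkeys2 ▸ hndmd
    have hlookmd : look md x = some nbd := look_of_getElem? hndmd hmdj
    have hlookmσ : look mσ x = some nbs := look_of_getElem? hndmσ hmσj
    have hgd : g2 d t x = some nbd := by unfold g2; rw [hlookd]; exact hlookmd
    have hgs : g2 σ t x = some nbs := by unfold g2; rw [hlookσ]; exact hlookmσ
    have hstep : middleA (f + 1) σ i j = middleA f (innerA nbs.length σ i j 0) i (j + 1) := by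
      simp [middleA, hσi, hmσj]
    obtain ⟨iEq, iInv⟩ := inner_sim d hpre nbs.length 0 σ i j t md x nbd nbs hinv hdi hmdj hgd hgs (by omega)
    rw [List.drop_zero] at iEq
    obtain ⟨mEq, mInv⟩ := ih (j + 1) (innerA nbs.length σ i j 0) i t md iInv hdi (by omega)
    refine ⟨?_, by rw [hstep]; exact mInv⟩
    rw [hstep, mEq, iEq]
    have hget : md[j] = (x, nbd) := by
      rw [List.getElem?_eq_getElem hjlt] at hmdj
      exact Option.some.inj hmdj
    have hdropj : md.drop j = (x, nbd) :: md.drop (j + 1) := by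
      rw [List.drop_eq_getElem_cons hjlt, hget]
    rw [hdropj, List.flatMap_cons, applyW_append]

theorem outer_sim (d : St) (hpre : Pre_buildLikewiseRelationships d) :
    ∀ (f i : ℕ) (σ : St),
      INV d σ → f + i = d.length →
      outerA f σ i = applyW σ ((d.drop i).flatMap (fun p => p.2.flatMap (fun q => q.2.map (fun e => (p.1, q.1, e.1, e.2))))) ∧
        INV d (outerA f σ i) := by
  intro f
  induction f with
  | zero =>
    intro i σ hinv hfi
    have hd : d.drop i = [] := List.drop_eq_nil_of_le (by omega)
    rw [hd]
    exact ⟨rfl, hinv⟩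
  | succ f ih =>
    intro i σ hinv hfi
    have hilt : i < d.length := by omega
    obtain ⟨t, md, hdi⟩ : ∃ t md, d[i]? = some (t, md) := by
      cases h : d[i]? with
      | none => have := List.getElem?_eq_none_iff.mp h; omega
      | some p => obtain ⟨a, b⟩ := p; exact ⟨a, b, rfl⟩
    obtain ⟨mσ, hσi⟩ := pos_some hinv.1 hdi
    have hlookd : look d t = some md := look_of_getElem? hpre.1 hdi
    have hnds : (σ.map Prod.fst).Nodup := hinv.1 ▸ hpre.1
    have hlookσ : look σ t = some mσ := look_of_getElem? hnds hσi
    have hkeys2 : mσ.map Prod.fst = md.map Prod.fst := hinv.2.1 t md mσ hlookd hlookσ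
    have hlen : mσ.length = md.length := by
      have := congrArg List.length hkeys2
      simpa using this
    have hstep : outerA (f + 1) σ i = outerA f (middleA mσ.length σ i 0) (i + 1) := by
      simp [outerA, hσi]
    obtain ⟨mEq, mInv⟩ := middle_sim d hpre mσ.length 0 σ i t md hinv hdi (by omega)
    rw [List.drop_zero] at mEq
    obtain ⟨oEq, oInv⟩ := ih (i + 1) (middleA mσ.length σ i 0) mInv (by omega)
    refine ⟨?_, by rw [hstep]; exact oInv⟩
    rw [hstep, oEq, mEq]
    have hget : d[i] = (t, md) := by
      rw [List.getElem?_eq_getElem hilt] at hdi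
      exact Option.some.inj hdi
    have hdropi : d.drop i = (t, md) :: d.drop (i + 1) := by
      rw [List.drop_eq_getElem_cons hilt, hget]
    rw [hdropi, List.flatMap_cons, applyW_append]

theorem INV_refl (d : St) (hpre : Pre_buildLikewiseRelationships d) : INV d d := by
  refine ⟨rfl, ?_, ?_⟩
  · intro t m m' h1 h2
    rw [h1] at h2
    rw [Option.some.inj h2]
  · intro t x nbd nbs h1 h2
    rw [h1] at h2
    have he : nbd = nbs := Option.some.inj h2
    refine ⟨[], by rw [he, List.append_nil], ?_, by simp⟩
    obtain ⟨m, hm, hxm⟩ := g2_mem h1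
    have := hpre.2.2.1 (t, m) hm (x, nbd) hxm
    rw [← he]
    exact this

theorem main_sim (d : St) (hpre : Pre_buildLikewiseRelationships d) :
    buildLikewiseRelationships d = buildLikewiseRelationships_alt d := by
  obtain ⟨oEq, _⟩ := outer_sim d hpre d.length 0 d (INV_refl d hpre) (by omega)
  rw [List.drop_zero] at oEq
  unfold buildLikewiseRelationships buildLikewiseRelationships_alt gather
  exact oEq

-- ===== VERDICT (by name: the statement is the Claim_ definition above) =====
theorem buildLikewiseRelationships_spec : Claim_equal_buildLikewiseRelationships := by
  intro d _ hpre
  unfold Spec_buildLikewiseRelationships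
  exact main_sim d hpre
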